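-- pv_equiv track=rewrite | github.com/bioinformatics-007/EpitopeFinder | modules/vaccine_assembly.py | multiepitope_vaccine
-- ===== SOURCE A (Python) =====
-- def epitope_combinations(sequence, list_epitopes):
--     return [sequence + i for i in list_epitopes]
--
-- def multiepitope_vaccine(components, order, start='', end=''):
--     subunit = []
--     for category_idx in order:
--         comp_list = components[category_idx]
--         if not comp_list: continue
--         if not subunit:
--             subunit = [start + c for c in comp_list]
--         else:
--             new_ls = []
--             for vaccine_base in subunit:
--                 new_ls.extend(epitope_combinations(vaccine_base, comp_list))
--             subunit = new_ls
--
--     # Add C-terminal (His-tag)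
--     return [s + end for s in subunit] if subunit else [start + end]
-- ===== SOURCE B (Python) =====
-- def multiepitope_vaccine(components, order, start='', end=''):
--     lists = [components[k] for k in order if components[k]]
--     def combos(i):
--         if i == len(lists):
--             return [end]
--         return [c + rest for c in lists[i] for rest in combos(i + 1)]
--     return [start + s for s in combos(0)]
-- ===== Notes on version B (the rewrite author's own statement) =====
-- stated objective: simpler
-- what changed: A iteratively grows a list of prefixes left-to-right with an in-place if-empty bootstrap and a trailing fallback; B pre-filters the non-empty component lists and builds all suffix combinations by a single right-to-left recursion, so the empty-case fallback and the bootstrap branch disappear.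
import Mathlib
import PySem

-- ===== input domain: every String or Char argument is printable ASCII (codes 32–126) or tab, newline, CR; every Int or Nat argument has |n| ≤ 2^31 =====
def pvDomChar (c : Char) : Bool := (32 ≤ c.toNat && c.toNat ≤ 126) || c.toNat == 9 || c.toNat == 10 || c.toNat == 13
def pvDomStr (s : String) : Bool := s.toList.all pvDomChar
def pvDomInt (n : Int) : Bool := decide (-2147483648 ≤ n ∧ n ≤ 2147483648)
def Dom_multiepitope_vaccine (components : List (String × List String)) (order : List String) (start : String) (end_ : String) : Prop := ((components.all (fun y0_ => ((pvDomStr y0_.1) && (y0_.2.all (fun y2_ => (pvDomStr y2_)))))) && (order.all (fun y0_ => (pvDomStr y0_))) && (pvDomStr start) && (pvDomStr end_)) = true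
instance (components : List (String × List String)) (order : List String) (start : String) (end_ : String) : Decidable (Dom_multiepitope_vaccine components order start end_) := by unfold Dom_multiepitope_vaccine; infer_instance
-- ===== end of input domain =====

-- B replaces A's iterative left-to-right prefix accumulation by a recursive right-to-left
-- suffix construction over the pre-filtered component lists (objective: simpler decomposition).
-- Equivalence of RETURN VALUES on Pre_ (A raises KeyError when order names a missing key).

-- ===== PORT A =====
def epitope_combinations (sequence : String) (list_epitopes : List String) : List String :=
  list_epitopes.map (fun i => sequence ++ i)

-- the body of A's 'for category_idx in order' loop
def pvStepA (components : List (String × List String)) (start : String)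
    (subunit : List String) (category_idx : String) : List String :=
  let comp_list := (components.lookup category_idx).getD []   -- total under Pre_ (key present)
  if comp_list = [] then subunit
  else if subunit = [] then comp_list.map (fun c => start ++ c)
  else subunit.foldl (fun new_ls vaccine_base => new_ls ++ epitope_combinations vaccine_base comp_list) []

def multiepitope_vaccine (components : List (String × List String)) (order : List String) (start : String) (end_ : String) : List String :=
  let subunit := order.foldl (pvStepA components start) []
  if subunit = [] then [start ++ end_] else subunit.map (fun s => s ++ end_)

-- ===== PORT B =====
-- lists = [components[k] for k in order if components[k]]
def pvListsB (components : List (String × List String)) (order : List String) : List (List String) :=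
  order.filterMap (fun k =>
    match components.lookup k with   -- total under Pre_ (key present)
    | some l => if l = [] then none else some l
    | none => none)

-- combos(i): recursion over the remaining lists, building suffixes ending with `end_`
def pvCombosB (end_ : String) : List (List String) → List String
  | [] => [end_]
  | l :: ls => l.flatMap (fun c => (pvCombosB end_ ls).map (fun rest => c ++ rest))

def multiepitope_vaccine_alt (components : List (String × List String)) (order : List String) (start : String) (end_ : String) : List String :=
  (pvCombosB end_ (pvListsB components order)).map (fun s => start ++ s)

-- ===== PRECONDITION & SPEC =====
-- Pre_ excludes exactly the inputs where Python A raises KeyError: some key of `order` missing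
-- from `components` (B raises there too).
def Pre_multiepitope_vaccine (components : List (String × List String)) (order : List String) (start : String) (end_ : String) : Prop :=
  ∀ k ∈ order, (components.lookup k).isSome = true
instance (components : List (String × List String)) (order : List String) (start : String) (end_ : String) : Decidable (Pre_multiepitope_vaccine components order start end_) := by unfold Pre_multiepitope_vaccine; infer_instance

def pvWitness_multiepitope_vaccine : (List (String × List String)) × List String × String × String :=
  ([("a", ["X", "Y"]), ("b", ["Z"])], ["a", "b"], "S", "E")

def Spec_multiepitope_vaccine (components : List (String × List String)) (order : List String) (start : String) (end_ : String) (out : List String) : Prop := out = multiepitope_vaccine_alt components order start end_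
instance (components : List (String × List String)) (order : List String) (start : String) (end_ : String) (out : List String) : Decidable (Spec_multiepitope_vaccine components order start end_ out) := by unfold Spec_multiepitope_vaccine; infer_instance

-- ===== CLAIM (what is proved, stated in full; the proofs are below) =====
def Claim_equal_multiepitope_vaccine : Prop := ∀ (components : List (String × List String)) (order : List String) (start : String) (end_ : String), Dom_multiepitope_vaccine components order start end_ → Pre_multiepitope_vaccine components order start end_ → Spec_multiepitope_vaccine components order start end_ (multiepitope_vaccine components order start end_)

-- ===== LEMMAS AND PROOFS =====

theorem pvStepA_skip (components : List (String × List String)) (start : String)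
    (subunit : List String) (k : String) (h : (components.lookup k).getD [] = []) :
    pvStepA components start subunit k = subunit := by
  unfold pvStepA; simp [h]

theorem pvStepA_first (components : List (String × List String)) (start : String) (k : String)
    (h1 : (components.lookup k).getD [] ≠ []) :
    pvStepA components start [] k = ((components.lookup k).getD []).map (fun c => start ++ c) := by
  unfold pvStepA; simp [h1]

theorem pvStepA_ext (components : List (String × List String)) (start : String)
    (subunit : List String) (k : String) (h1 : (components.lookup k).getD [] ≠ [])
    (h : subunit ≠ []) :
    pvStepA components start subunit k
      = subunit.flatMap (fun vb => epitope_combinations vb ((components.lookup k).getD [])) := by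
  unfold pvStepA
  simp only [if_neg h1, if_neg h]
  rw [PySem.List.foldl_append_eq_flatMap]
  exact List.nil_append _

theorem pvFlatMap_comb_ne_nil (subunit comp : List String) (h : subunit ≠ []) (h1 : comp ≠ []) :
    subunit.flatMap (fun vb => epitope_combinations vb comp) ≠ [] := by
  obtain ⟨x, hx⟩ := List.exists_mem_of_ne_nil _ h
  intro hnil
  rw [List.flatMap_eq_nil_iff] at hnil
  exact h1 (by simpa [epitope_combinations, List.map_eq_nil_iff] using hnil x hx)

theorem pvListsB_cons_skip (components : List (String × List String)) (k : String)
    (ks : List String) (h : (components.lookup k).getD [] = []) :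
    pvListsB components (k :: ks) = pvListsB components ks := by
  simp only [pvListsB, List.filterMap_cons]
  rcases hlk : components.lookup k with _ | l
  · simp
  · have : l = [] := by simpa [hlk] using h
    simp [this]

theorem pvListsB_cons_keep (components : List (String × List String)) (k : String)
    (ks : List String) (h1 : (components.lookup k).getD [] ≠ []) :
    pvListsB components (k :: ks) = (components.lookup k).getD [] :: pvListsB components ks := by
  rcases hlk : components.lookup k with _ | l
  · simp [hlk] at h1
  · have hl : l ≠ [] := by simpa [hlk] using h1
    simp [pvListsB, List.filterMap_cons, hlk, hl]

theorem pvFoldl_ne_nil (components : List (String × List String)) (start : String)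
    (order : List String) (subunit : List String) (h : subunit ≠ []) :
    order.foldl (pvStepA components start) subunit ≠ [] := by
  induction order generalizing subunit with
  | nil => simpa using h
  | cons k ks ih =>
    simp only [List.foldl_cons]
    apply ih
    by_cases h1 : (components.lookup k).getD [] = []
    · rw [pvStepA_skip components start subunit k h1]; exact h
    · rw [pvStepA_ext components start subunit k h1 h]
      exact pvFlatMap_comb_ne_nil subunit _ h h1

theorem pvMain1 (components : List (String × List String)) (start end_ : String)
    (order : List String) (subunit : List String) (h : subunit ≠ []) :
    (order.foldl (pvStepA components start) subunit).map (fun s => s ++ end_)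
      = subunit.flatMap (fun p => (pvCombosB end_ (pvListsB components order)).map (fun r => p ++ r)) := by
  induction order generalizing subunit with
  | nil =>
    clear h
    induction subunit with
    | nil => simp
    | cons a t iht => simp_all [pvListsB, pvCombosB]
  | cons k ks ih =>
    simp only [List.foldl_cons]
    by_cases h1 : (components.lookup k).getD [] = []
    · rw [pvStepA_skip components start subunit k h1, pvListsB_cons_skip components k ks h1]
      exact ih subunit h
    · rw [pvStepA_ext components start subunit k h1 h, pvListsB_cons_keep components k ks h1]
      rw [ih _ (pvFlatMap_comb_ne_nil subunit _ h h1)]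
      simp [pvCombosB, epitope_combinations, List.flatMap_assoc, List.map_flatMap,
        List.flatMap_map, List.map_map, Function.comp_def, String.append_assoc]

theorem pvMain2 (components : List (String × List String)) (start end_ : String)
    (order : List String) :
    multiepitope_vaccine components order start end_
      = multiepitope_vaccine_alt components order start end_ := by
  unfold multiepitope_vaccine multiepitope_vaccine_alt
  induction order with
  | nil => simp [pvListsB, pvCombosB]
  | cons k ks ih =>
    simp only [List.foldl_cons]
    by_cases h1 : (components.lookup k).getD [] = []
    · rw [pvStepA_skip components start [] k h1, pvListsB_cons_skip components k ks h1]
      exact ih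
    · have hsub : ((components.lookup k).getD []).map (fun c => start ++ c) ≠ [] := by
        simp [List.map_eq_nil_iff, h1]
      rw [pvStepA_first components start k h1, pvListsB_cons_keep components k ks h1]
      rw [if_neg (pvFoldl_ne_nil components start ks _ hsub)]
      rw [pvMain1 components start end_ ks _ hsub]
      simp [pvCombosB, List.flatMap_map, List.map_flatMap, List.map_map,
        Function.comp_def, String.append_assoc]

-- ===== VERDICT (by name: the statement is the Claim_ definition above) =====
theorem multiepitope_vaccine_spec : Claim_equal_multiepitope_vaccine := by
  intro components order start end_ _ _
  unfold Spec_multiepitope_vaccine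
  exact pvMain2 components start end_ order
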